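-- pv_equiv track=rewrite | github.com/isasimsekk/find-majority-algorithm-compare-project | main.py | generate_worst_case_input_merge_sort
-- ===== SOURCE A (Python) =====
-- def generate_worst_case_input_merge_sort(size):
--     # Create a sorted list from 1 to size
--     arr = list(range(1, size + 1))
--
--     # Generate the alternating pattern (e.g., 2, 4, 6, 1, 3, 5)
--     result = []
--     left = 0
--     right = size - 1
--     while left <= right:
--         if left <= right:
--             result.append(arr[right])  # Take the largest element
--             right -= 1
--         if left <= right:
--             result.append(arr[left])  # Take the smallest element
--             left += 1
--
--     return result
-- ===== SOURCE B (Python) =====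
-- def generate_worst_case_input_merge_sort(size):
--     # closed form: even index i -> size - i//2, odd index i -> i//2 + 1
--     return [size - i // 2 if i % 2 == 0 else i // 2 + 1 for i in range(size)]
-- ===== Notes on version B (the rewrite author's own statement) =====
-- stated objective: simpler
-- what changed: Replaced the materialized sorted array and the two-pointer while-loop with mutable left/right/result state by a single comprehension that maps each output index directly to its value via a parity-based closed form (even index: size minus half the index; odd index: half the index plus one).
import Mathlib
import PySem

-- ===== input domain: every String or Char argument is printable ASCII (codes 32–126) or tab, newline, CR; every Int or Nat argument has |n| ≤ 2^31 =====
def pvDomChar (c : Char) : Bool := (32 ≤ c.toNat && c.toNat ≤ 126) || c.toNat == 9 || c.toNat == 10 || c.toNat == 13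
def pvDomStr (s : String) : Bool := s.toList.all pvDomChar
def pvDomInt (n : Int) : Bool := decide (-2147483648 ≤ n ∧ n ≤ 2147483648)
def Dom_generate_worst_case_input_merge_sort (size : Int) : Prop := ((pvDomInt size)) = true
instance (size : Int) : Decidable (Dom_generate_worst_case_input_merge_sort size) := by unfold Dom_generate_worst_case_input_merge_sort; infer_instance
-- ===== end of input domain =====

-- B replaces A's array + two-pointer while-loop by a direct index→value closed form (simpler decomposition; same O(n) cost).

-- ===== PORT A =====
-- the while-loop; fuel bounds the number of iterations (each iteration decreases `right`,
-- so size.toNat + 1 iterations always suffice).  `(pyGet? …).getD 0` is exact here: the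
-- indices are always in range when read (0 ≤ left ≤ right < size), so pyGet? never returns none.
def pvLoopA (arr : List Int) : Nat → Int → Int → List Int → List Int
  | 0, _, _, acc => acc
  | fuel+1, left, right, acc =>
    if left ≤ right then
      let acc1 := acc ++ [(PySem.List.pyGet? arr right).getD 0]
      let right1 := right - 1
      if left ≤ right1 then
        pvLoopA arr fuel (left+1) right1 (acc1 ++ [(PySem.List.pyGet? arr left).getD 0])
      else
        pvLoopA arr fuel left right1 acc1
    else acc

def generate_worst_case_input_merge_sort (size : Int) : List Int :=
  let arr := PySem.List.pyRange 1 (size + 1) 1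
  pvLoopA arr (size.toNat + 1) 0 (size - 1) []

-- ===== PORT B =====
def generate_worst_case_input_merge_sort_alt (size : Int) : List Int :=
  (PySem.List.pyRange 0 size 1).map (fun i =>
    if PySem.Int.mod i 2 = 0 then size - PySem.Int.floordiv i 2
    else PySem.Int.floordiv i 2 + 1)

-- ===== PRECONDITION & SPEC =====
def Spec_generate_worst_case_input_merge_sort (size : Int) (out : List Int) : Prop := out = generate_worst_case_input_merge_sort_alt size
instance (size : Int) (out : List Int) : Decidable (Spec_generate_worst_case_input_merge_sort size out) := by unfold Spec_generate_worst_case_input_merge_sort; infer_instance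

-- ===== CLAIM (what is proved, stated in full; the proofs are below) =====
def Claim_equal_generate_worst_case_input_merge_sort : Prop := ∀ (size : Int), Dom_generate_worst_case_input_merge_sort size → Spec_generate_worst_case_input_merge_sort size (generate_worst_case_input_merge_sort size)

-- ===== LEMMAS AND PROOFS =====

-- the common intermediate shape: the interleave size-l, l+1, size-(l+1), l+2, …  (m = elements left)
def pvMid (size : Int) : Nat → Int → List Int
  | 0, _ => []
  | 1, l => [size - l]
  | m+2, l => (size - l) :: (l + 1) :: pvMid size m (l + 1)

-- reading arr = list(range(1, size+1)) at an in-range index i yields i+1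
theorem pvGetArr (size i : Int) (h0 : 0 ≤ i) (h1 : i < size) :
    (PySem.List.pyGet? (PySem.List.pyRange 1 (size + 1) 1) i).getD 0 = i + 1 := by
  rw [PySem.List.pyRange_one, PySem.List.pyGet?_of_nonneg _ h0]
  have hlt : i.toNat < (size + 1 - 1).toNat := by omega
  rw [List.getElem?_map, List.getElem?_range hlt]
  simp; omega

theorem pvLoopA_stop (arr : List Int) (fuel : Nat) (l r : Int) (acc : List Int)
    (h : ¬ l ≤ r) : pvLoopA arr fuel l r acc = acc := by
  cases fuel with
  | zero => rfl
  | succ n => simp [pvLoopA, h]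

-- A's loop, run at the invariant r = size-1-l, produces the interleave pvMid
theorem pvLoopA_eq (size : Int) : ∀ (fuel : Nat) (l : Int) (acc : List Int),
    0 ≤ l → (size - 2 * l).toNat < fuel →
    pvLoopA (PySem.List.pyRange 1 (size + 1) 1) fuel l (size - 1 - l) acc
      = acc ++ pvMid size (size - 2 * l).toNat l := by
  intro fuel
  induction fuel with
  | zero => intro l acc _ h; omega
  | succ n ih =>
    intro l acc hl hfuel
    by_cases hlr : l ≤ size - 1 - l
    · -- at least one element left
      rw [pvLoopA]
      simp only [if_pos hlr]
      rw [pvGetArr size (size - 1 - l) (by omega) (by omega)]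
      by_cases hlr1 : l ≤ size - 1 - l - 1
      · -- two or more elements left: take largest then smallest, recurse
        simp only [if_pos hlr1]
        rw [pvGetArr size l hl (by omega)]
        have hr : size - 1 - l - 1 = size - 1 - (l + 1) := by ring
        rw [hr, ih (l + 1) _ (by omega) (by omega)]
        have hm : (size - 2 * l).toNat = (size - 2 * (l + 1)).toNat + 2 := by omega
        rw [hm]
        have hv : size - 1 - l + 1 = size - l := by ring
        simp [pvMid, hv]
      · -- exactly one element left (l = size-1-l)
        simp only [if_neg hlr1]
        rw [pvLoopA_stop _ _ _ _ _ (by omega)]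
        have hm : (size - 2 * l).toNat = 1 := by omega
        have hv : size - 1 - l + 1 = size - l := by omega
        simp [hm, pvMid, hv]
    · -- loop never runs
      rw [pvLoopA_stop _ _ _ _ _ hlr]
      have hm : (size - 2 * l).toNat = 0 := by omega
      simp [hm, pvMid]

-- B's comprehension, read off from index 2*l onward, is the same interleave
theorem pvMap_eq (size : Int) : ∀ (m : Nat) (l : Int), 0 ≤ l → m = (size - 2 * l).toNat →
    (PySem.List.pyRange (2 * l) size 1).map (fun i =>
      if PySem.Int.mod i 2 = 0 then size - PySem.Int.floordiv i 2
      else PySem.Int.floordiv i 2 + 1) = pvMid size m l := by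
  intro m
  induction m using Nat.strong_induction_on with
  | _ m ih =>
    intro l hl hm
    match m, hm with
    | 0, hm =>
      rw [PySem.List.pyRange_one_eq_nil (by omega)]
      simp [pvMid]
    | 1, hm =>
      have hsz : size = 2 * l + 1 := by omega
      rw [PySem.List.pyRange_one_cons (by omega),
          PySem.List.pyRange_one_eq_nil (by omega)]
      simp [pvMid]
    | m + 2, hm =>
      rw [PySem.List.pyRange_one_cons (by omega),
          PySem.List.pyRange_one_cons (by omega)]
      have he : PySem.Int.mod (2 * l) 2 = 0 := by
        rw [PySem.Int.mod_eq_emod_of_pos (by omega)]; omega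
      have ho : PySem.Int.mod (2 * l + 1) 2 ≠ 0 := by
        rw [PySem.Int.mod_eq_emod_of_pos (by omega)]; omega
      have hde : PySem.Int.floordiv (2 * l) 2 = l := by
        rw [PySem.Int.floordiv_eq_ediv_of_pos (by omega)]; omega
      have hdo : PySem.Int.floordiv (2 * l + 1) 2 = l := by
        rw [PySem.Int.floordiv_eq_ediv_of_pos (by omega)]; omega
      have hnext : 2 * l + 1 + 1 = 2 * (l + 1) := by ring
      simp only [List.map_cons, he, hde, ho, hdo, if_pos, hnext]
      rw [ih m (by omega) (l + 1) (by omega) (by omega)]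
      simp [pvMid]

-- ===== VERDICT (by name: the statement is the Claim_ definition above) =====
theorem generate_worst_case_input_merge_sort_spec : Claim_equal_generate_worst_case_input_merge_sort := by
  intro size _
  unfold Spec_generate_worst_case_input_merge_sort
  unfold generate_worst_case_input_merge_sort generate_worst_case_input_merge_sort_alt
  have hA := pvLoopA_eq size (size.toNat + 1) 0 [] (by omega) (by omega)
  have hB := pvMap_eq size (size - 2 * 0).toNat 0 (by omega) rfl
  simp only [sub_zero, mul_zero] at hA hB
  show pvLoopA (PySem.List.pyRange 1 (size + 1) 1) (size.toNat + 1) 0 (size - 1) [] = _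
  rw [hA, ← hB]
  simp
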